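-- pv_equiv track=rewrite | github.com/ChangKuoman/Mentoria-CS1111-2021-2 | s5/s05.10.py | letra
-- ===== SOURCE A (Python) =====
-- def letra(abc):
--     p = False
--     a = False
--     n = False
--     for i in abc:
--         #i = p, i = a
--         if i == "p":
--             p = True
--         elif i == "a":
--             a = True
--         elif i == "n":
--             n = True
--     return p and a and n
-- ===== SOURCE B (Python) =====
-- def letra(abc):
--     return set("pan").issubset(set(abc))
-- ===== Notes on version B (the rewrite author's own statement) =====
-- stated objective: simpler
-- what changed: Replaces the branching loop maintaining three boolean flags with building the set of distinct characters once and testing that the fixed three-letter target set is a subset of it.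
import Mathlib
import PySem

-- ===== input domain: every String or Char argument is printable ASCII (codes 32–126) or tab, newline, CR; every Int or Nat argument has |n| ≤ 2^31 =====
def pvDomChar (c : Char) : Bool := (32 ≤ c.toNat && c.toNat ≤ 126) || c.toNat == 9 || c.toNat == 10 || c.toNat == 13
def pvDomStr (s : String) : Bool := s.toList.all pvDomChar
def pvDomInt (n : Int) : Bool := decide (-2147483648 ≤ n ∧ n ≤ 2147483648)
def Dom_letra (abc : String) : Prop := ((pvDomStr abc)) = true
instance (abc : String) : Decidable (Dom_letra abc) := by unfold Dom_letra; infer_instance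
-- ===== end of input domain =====

-- B replaces the three-flag branching loop by building the distinct-character set and testing that {'p','a','n'} is a subset (simpler).


-- ===== PORT A =====
def letra (abc : String) : Bool :=
  let st := abc.toList.foldl (fun (s : Bool × Bool × Bool) i =>
    if i = 'p' then (true, s.2.1, s.2.2)
    else if i = 'a' then (s.1, true, s.2.2)
    else if i = 'n' then (s.1, s.2.1, true)
    else s) (false, false, false)
  st.1 && st.2.1 && st.2.2

-- ===== PORT B =====
def letra_alt (abc : String) : Bool :=
  PySem.Set.issubset (PySem.Set.ofList "pan".toList) (PySem.Set.ofList abc.toList)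

-- ===== PRECONDITION & SPEC =====
def Spec_letra (abc : String) (out : Bool) : Prop := out = letra_alt abc
instance (abc : String) (out : Bool) : Decidable (Spec_letra abc out) := by unfold Spec_letra; infer_instance

-- ===== CLAIM (what is proved, stated in full; the proofs are below) =====
def Claim_equal_letra : Prop := ∀ (abc : String), Dom_letra abc → Spec_letra abc (letra abc)

-- ===== LEMMAS AND PROOFS =====
lemma letra_foldl (l : List Char) (s : Bool × Bool × Bool) :
    l.foldl (fun (s : Bool × Bool × Bool) i =>
      if i = 'p' then (true, s.2.1, s.2.2)
      else if i = 'a' then (s.1, true, s.2.2)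
      else if i = 'n' then (s.1, s.2.1, true)
      else s) s
    = (s.1 || l.contains 'p', s.2.1 || l.contains 'a', s.2.2 || l.contains 'n') := by
  induction l generalizing s with
  | nil => simp
  | cons c t ih =>
    simp only [List.foldl_cons, ih]
    by_cases hp : c = 'p' <;> by_cases ha : c = 'a' <;> by_cases hn : c = 'n' <;>
      simp_all [eq_comm]

-- ===== VERDICT (by name: the statement is the Claim_ definition above) =====
theorem letra_spec : Claim_equal_letra := by
  intro abc _
  unfold Spec_letra letra letra_alt
  simp only [letra_foldl, Bool.false_or]
  simp [PySem.Set.issubset, PySem.Set.mem_ofList]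
  have h : PySem.Set.ofList ['p', 'a', 'n'] = ['p', 'a', 'n'] := by decide
  rw [h]
  simp [List.all_cons, Bool.and_assoc]
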